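-- pv_equiv track=rewrite | github.com/Ravi-0412/DSA-Program-And-Notes | Bitwise_Manipulation/nth_magical no.py | nth_magical
-- ===== SOURCE A (Python) =====
-- def nth_magical(n):
--     # multiply the rightmost bit till number becomes '0' by power of
--     # '5' by incr power by '1' in each iteration
--
--     # for getting the  rightmost bit in each iteration
--     # '&'with '1'
--
--     i=1
--     num=0
--     while(n>0):
--         right_most= n & 1
--         num+= right_most*pow(5,i)
--         i+= 1
--         n= n>>1  # do right shift one to get next right most bit
--     return num
-- ===== SOURCE B (Python) =====
-- def nth_magical(n):
--     # MSB-first: interpret the binary digits of n as a base-5 numeral,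
--     # then multiply by 5 (A weights the lowest bit with 5^1).
--     if n <= 0:
--         return 0
--     return 5 * int(bin(n)[2:], 5)
-- ===== Notes on version B (the rewrite author's own statement) =====
-- stated objective: idiomatic
-- what changed: Replaced the LSB bit-masking while-loop accumulating powers of 5 with an MSB-first positional evaluation: 5 * int(bin(n)[2:], 5).
import Mathlib
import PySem

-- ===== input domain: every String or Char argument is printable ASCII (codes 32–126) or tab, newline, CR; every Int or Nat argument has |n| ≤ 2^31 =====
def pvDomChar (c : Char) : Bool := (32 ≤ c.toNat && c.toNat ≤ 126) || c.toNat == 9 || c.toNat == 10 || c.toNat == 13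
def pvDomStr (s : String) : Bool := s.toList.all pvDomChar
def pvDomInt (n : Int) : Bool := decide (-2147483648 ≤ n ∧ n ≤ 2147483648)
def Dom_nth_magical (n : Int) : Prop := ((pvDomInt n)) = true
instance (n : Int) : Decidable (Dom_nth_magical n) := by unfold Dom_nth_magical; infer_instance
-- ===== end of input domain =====

-- B replaces A's LSB bit-masking loop by MSB-first positional evaluation 5 * int(bin(n)[2:], 5) (idiomatic; same cost).

-- ===== PORT A =====
-- the while-loop: state (n, i, num); 'n & 1' = Python 'n % 2' (exact on all ints), 'n >> 1' = Python 'n // 2'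
def nth_magicalGo (n : Int) (i : Nat) (num : Int) : Int :=
  if h : n > 0 then
    nth_magicalGo (PySem.Int.floordiv n 2) (i + 1) (num + PySem.Int.mod n 2 * 5 ^ i)
  else num
termination_by n.toNat
decreasing_by
  have h2 : PySem.Int.floordiv n 2 = n / 2 := PySem.Int.floordiv_eq_ediv_of_pos (by omega)
  rw [h2]; omega

def nth_magical (n : Int) : Int := nth_magicalGo n 1 0

-- ===== PORT B =====
-- bin(n)[2:] for n > 0: the binary digits of n, most significant first
def nth_magicalBits (m : Nat) : List Int :=
  if h : m = 0 then [] else nth_magicalBits (m / 2) ++ [((m % 2 : Nat) : Int)]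
termination_by m
decreasing_by exact Nat.div_lt_self (Nat.pos_of_ne_zero h) (by norm_num)

-- int(s, 5): Horner evaluation of the digit string, MSB first
def nth_magicalHorner (ds : List Int) : Int := ds.foldl (fun acc d => acc * 5 + d) 0

def nth_magical_alt (n : Int) : Int :=
  if n ≤ 0 then 0 else 5 * nth_magicalHorner (nth_magicalBits n.toNat)

-- ===== PRECONDITION & SPEC =====
def Spec_nth_magical (n : Int) (out : Int) : Prop := out = nth_magical_alt n
instance (n : Int) (out : Int) : Decidable (Spec_nth_magical n out) := by unfold Spec_nth_magical; infer_instance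

-- ===== CLAIM (what is proved, stated in full; the proofs are below) =====
def Claim_equal_nth_magical : Prop := ∀ (n : Int), Dom_nth_magical n → Spec_nth_magical n (nth_magical n)

-- ===== LEMMAS AND PROOFS =====

-- the common value: base-5 interpretation of m's binary digits, LSB at weight 5^0
def pvV (m : Nat) : Int :=
  if h : m = 0 then 0 else 5 * pvV (m / 2) + ((m % 2 : Nat) : Int)
termination_by m
decreasing_by exact Nat.div_lt_self (Nat.pos_of_ne_zero h) (by norm_num)

theorem pvGoA_eq (m : Nat) : ∀ (i : Nat) (num : Int),
    nth_magicalGo (m : Int) i num = num + 5 ^ i * pvV m := by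
  induction m using Nat.strong_induction_on with
  | _ m ih =>
    intro i num
    by_cases h0 : m = 0
    · subst h0
      rw [nth_magicalGo, pvV]; simp
    · rw [nth_magicalGo, pvV]
      have hpos : (m : Int) > 0 := by exact_mod_cast Nat.pos_of_ne_zero h0
      rw [dif_pos hpos, dif_neg h0]
      have hd : PySem.Int.floordiv (m : Int) 2 = ((m / 2 : Nat) : Int) := by
        exact_mod_cast PySem.Int.floordiv_natCast m 2
      have hm : PySem.Int.mod (m : Int) 2 = ((m % 2 : Nat) : Int) := by
        exact_mod_cast PySem.Int.mod_natCast m 2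
      rw [hd, hm, ih (m / 2) (Nat.div_lt_self (Nat.pos_of_ne_zero h0) (by norm_num))]
      ring

theorem pvHorner_eq (m : Nat) : nth_magicalHorner (nth_magicalBits m) = pvV m := by
  induction m using Nat.strong_induction_on with
  | _ m ih =>
    by_cases h0 : m = 0
    · subst h0; rw [nth_magicalBits, pvV]; simp [nth_magicalHorner]
    · rw [nth_magicalBits, pvV, dif_neg h0, dif_neg h0]
      rw [nth_magicalHorner, List.foldl_append]
      rw [← nth_magicalHorner, ih (m / 2) (Nat.div_lt_self (Nat.pos_of_ne_zero h0) (by norm_num))]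
      simp [mul_comm]

-- ===== VERDICT (by name: the statement is the Claim_ definition above) =====
theorem nth_magical_spec : Claim_equal_nth_magical := by
  intro n _
  unfold Spec_nth_magical nth_magical nth_magical_alt
  by_cases h : n ≤ 0
  · rw [if_pos h, nth_magicalGo, dif_neg (by omega)]
  · rw [if_neg h]
    have hn : ((n.toNat : Nat) : Int) = n := Int.toNat_of_nonneg (by omega)
    calc nth_magicalGo n 1 0 = nth_magicalGo ((n.toNat : Nat) : Int) 1 0 := by rw [hn]
      _ = 0 + 5 ^ 1 * pvV n.toNat := pvGoA_eq n.toNat 1 0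
      _ = 5 * nth_magicalHorner (nth_magicalBits n.toNat) := by rw [pvHorner_eq]; ring
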